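-- pv_equiv track=rewrite | github.com/imjaya/Leetcode_solved | A_OA/shoping_options.py | numberOfOptionsUtil
-- ===== SOURCE A (Python) =====
-- def numberOfOptionsUtil(priceOfJeans, priceOfShoes, priceOfSkirts, priceOfTops, dollars, num_of_ways):
--
--     arrays = [priceOfJeans, priceOfShoes, priceOfSkirts, priceOfTops]
--
--     n = len(arrays)
--
--     indices = [0] * n
--
--     while True:
--
--         count = 0
--         for i in range(n):
--             count += arrays[i][indices[i]]
--             if count > dollars:
--                 break
--
--         if count <= dollars:
--             num_of_ways += 1
--
--         nextArray = n - 1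
--
--         while nextArray >= 0 and indices[nextArray] + 1 >= len(arrays[nextArray]):
--             nextArray -= 1
--
--         if nextArray < 0:
--             break
--
--         indices[nextArray] += 1
--
--         for i in range(nextArray + 1, n):
--             indices[i] = 0
--
--     return num_of_ways
-- ===== SOURCE B (Python) =====
-- def numberOfOptionsUtil(priceOfJeans, priceOfShoes, priceOfSkirts, priceOfTops, dollars, num_of_ways):
--     # Enumerate jeans+shoes+skirt sums, pruning any partial sum already over budget,
--     # sort them once, then count the affordable tops for each via binary search.
--     sums = []
--     for a in priceOfJeans:
--         if a > dollars:
--             continue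
--         for b in priceOfShoes:
--             if a + b > dollars:
--                 continue
--             for c in priceOfSkirts:
--                 if a + b + c <= dollars:
--                     sums.append(a + b + c)
--     sums.sort()
--     for t in priceOfTops:
--         limit = dollars - t
--         lo, hi = 0, len(sums)
--         while lo < hi:
--             mid = (lo + hi) // 2
--             if sums[mid] <= limit:
--                 lo = mid + 1
--             else:
--                 hi = mid
--         num_of_ways += lo
--     return num_of_ways
-- ===== Notes on version B (the rewrite author's own statement) =====
-- stated objective: faster
-- what changed: Replaced the odometer enumeration of all 4-index tuples by precomputing the budget-pruned jeans+shoes+skirt sums, sorting them once, and counting the matches for each top with a single binary search; Pre_ excludes the inputs (an empty price list reached by the index loop) on which A raises IndexError.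
import Mathlib
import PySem

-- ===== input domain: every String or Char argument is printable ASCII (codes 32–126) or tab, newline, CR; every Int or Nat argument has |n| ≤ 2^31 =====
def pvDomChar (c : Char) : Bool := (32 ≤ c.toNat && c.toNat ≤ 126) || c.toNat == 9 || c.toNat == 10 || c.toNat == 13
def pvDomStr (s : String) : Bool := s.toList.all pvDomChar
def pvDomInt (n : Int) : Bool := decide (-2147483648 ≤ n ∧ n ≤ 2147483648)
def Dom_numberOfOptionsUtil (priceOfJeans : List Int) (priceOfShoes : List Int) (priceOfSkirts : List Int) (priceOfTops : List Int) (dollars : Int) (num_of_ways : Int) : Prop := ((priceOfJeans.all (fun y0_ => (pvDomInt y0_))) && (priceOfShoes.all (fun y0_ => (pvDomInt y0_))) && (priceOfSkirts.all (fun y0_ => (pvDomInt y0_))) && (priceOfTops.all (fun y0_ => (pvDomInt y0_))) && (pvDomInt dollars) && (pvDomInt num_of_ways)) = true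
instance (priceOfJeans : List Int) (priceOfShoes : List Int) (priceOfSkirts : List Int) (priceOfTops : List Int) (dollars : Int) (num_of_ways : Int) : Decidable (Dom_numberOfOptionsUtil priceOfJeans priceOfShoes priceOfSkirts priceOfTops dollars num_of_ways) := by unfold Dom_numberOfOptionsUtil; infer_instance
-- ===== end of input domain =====

-- B replaces A's odometer enumeration of all 4-tuples by a budget-pruned enumeration of the
-- jeans+shoes+skirt sums, one sort, and one binary search per top; objective: faster.

-- ===== PORT A =====
-- inner `for i in range(n)` loop: running `count` with the `if count > dollars: break`.
-- Indexing `arrays[i][indices[i]]` uses getD: under Pre_ every index is provably in range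
-- (Python raises IndexError exactly where it would be out of range, and Pre_ excludes that).
def aCount : List (List Int × Nat) → Int → Int → Int
  | [], count, _ => count
  | (arr, i) :: rest, count, dollars =>
    let c := count + arr.getD i 0
    if c > dollars then c else aCount rest c dollars

-- the `nextArray` scan from the right + increment + zeroing of the tail, as one recursion:
-- the deepest (rightmost) position that can still be incremented wins.
def aStep : List (List Int) → List Nat → Option (List Nat)
  | [], _ => none
  | _ :: _, [] => none
  | arr :: ars, i :: idx =>
    match aStep ars idx with
    | some idx' => some (i :: idx')
    | none => if i + 1 < arr.length then some ((i + 1) :: idx.map (fun _ => 0)) else none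

-- the `while True` loop; fuel = number of index tuples, which is exactly how often it runs.
def aLoop : Nat → List (List Int) → List Nat → Int → Int → Int
  | 0, _, _, _, acc => acc
  | fuel + 1, ars, idx, dollars, acc =>
    let c := aCount (ars.zip idx) 0 dollars
    let acc' := if c ≤ dollars then acc + 1 else acc
    match aStep ars idx with
    | none => acc'
    | some idx' => aLoop fuel ars idx' dollars acc'

def numberOfOptionsUtil (priceOfJeans : List Int) (priceOfShoes : List Int) (priceOfSkirts : List Int) (priceOfTops : List Int) (dollars : Int) (num_of_ways : Int) : Int :=
  aLoop (priceOfJeans.length * priceOfShoes.length * priceOfSkirts.length * priceOfTops.length)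
    [priceOfJeans, priceOfShoes, priceOfSkirts, priceOfTops] [0, 0, 0, 0] dollars num_of_ways

-- ===== PORT B =====
-- the triple `for` loop with its `continue` pruning, building `sums`
def bSums (priceOfJeans priceOfShoes priceOfSkirts : List Int) (dollars : Int) : List Int :=
  priceOfJeans.flatMap (fun a =>
    if a > dollars then [] else
      priceOfShoes.flatMap (fun b =>
        if a + b > dollars then [] else
          priceOfSkirts.filterMap (fun c =>
            if a + b + c ≤ dollars then some (a + b + c) else none)))

-- Source B's hand-written lo/hi loop on `sums` with `limit = dollars - t` is exactly
-- bisect_right(sums, limit); ported as the PySem primitive.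
def numberOfOptionsUtil_alt (priceOfJeans : List Int) (priceOfShoes : List Int) (priceOfSkirts : List Int) (priceOfTops : List Int) (dollars : Int) (num_of_ways : Int) : Int :=
  let sums := PySem.List.sorted (bSums priceOfJeans priceOfShoes priceOfSkirts dollars) (fun x => x)
  priceOfTops.foldl (fun acc t =>
    acc + ((PySem.List.bisectRight sums (dollars - t) : Nat) : Int)) num_of_ways

-- ===== PRECONDITION & SPEC =====
-- Pre_ admits exactly the inputs on which Python A returns normally: either all four price
-- lists are nonempty, or the first empty list is never reached because every prefix sum
-- before it already exceeds dollars (otherwise A raises IndexError indexing the empty list).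
def Pre_numberOfOptionsUtil (priceOfJeans : List Int) (priceOfShoes : List Int) (priceOfSkirts : List Int) (priceOfTops : List Int) (dollars : Int) (num_of_ways : Int) : Prop :=
  priceOfJeans ≠ [] ∧
  ((priceOfShoes ≠ [] ∧ priceOfSkirts ≠ [] ∧ priceOfTops ≠ []) ∨
   (priceOfShoes = [] ∧ ∀ a ∈ priceOfJeans, ¬ a ≤ dollars) ∨
   (priceOfShoes ≠ [] ∧ priceOfSkirts = [] ∧
     ∀ a ∈ priceOfJeans, ∀ b ∈ priceOfShoes, ¬ (a ≤ dollars ∧ a + b ≤ dollars)) ∨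
   (priceOfShoes ≠ [] ∧ priceOfSkirts ≠ [] ∧ priceOfTops = [] ∧
     ∀ a ∈ priceOfJeans, ∀ b ∈ priceOfShoes, ∀ c ∈ priceOfSkirts,
       ¬ (a ≤ dollars ∧ a + b ≤ dollars ∧ a + b + c ≤ dollars)))
instance (priceOfJeans : List Int) (priceOfShoes : List Int) (priceOfSkirts : List Int) (priceOfTops : List Int) (dollars : Int) (num_of_ways : Int) : Decidable (Pre_numberOfOptionsUtil priceOfJeans priceOfShoes priceOfSkirts priceOfTops dollars num_of_ways) := by unfold Pre_numberOfOptionsUtil; infer_instance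

def pvWitness_numberOfOptionsUtil : List Int × List Int × List Int × List Int × Int × Int :=
  ([1, 3], [2], [0, 1], [1], 5, 0)

def Spec_numberOfOptionsUtil (priceOfJeans : List Int) (priceOfShoes : List Int) (priceOfSkirts : List Int) (priceOfTops : List Int) (dollars : Int) (num_of_ways : Int) (out : Int) : Prop := out = numberOfOptionsUtil_alt priceOfJeans priceOfShoes priceOfSkirts priceOfTops dollars num_of_ways
instance (priceOfJeans : List Int) (priceOfShoes : List Int) (priceOfSkirts : List Int) (priceOfTops : List Int) (dollars : Int) (num_of_ways : Int) (out : Int) : Decidable (Spec_numberOfOptionsUtil priceOfJeans priceOfShoes priceOfSkirts priceOfTops dollars num_of_ways out) := by unfold Spec_numberOfOptionsUtil; infer_instance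

-- ===== CLAIM (what is proved, stated in full; the proofs are below) =====
def Claim_equal_numberOfOptionsUtil : Prop := ∀ (priceOfJeans : List Int) (priceOfShoes : List Int) (priceOfSkirts : List Int) (priceOfTops : List Int) (dollars : Int) (num_of_ways : Int), Dom_numberOfOptionsUtil priceOfJeans priceOfShoes priceOfSkirts priceOfTops dollars num_of_ways → Pre_numberOfOptionsUtil priceOfJeans priceOfShoes priceOfSkirts priceOfTops dollars num_of_ways → Spec_numberOfOptionsUtil priceOfJeans priceOfShoes priceOfSkirts priceOfTops dollars num_of_ways (numberOfOptionsUtil priceOfJeans priceOfShoes priceOfSkirts priceOfTops dollars num_of_ways)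

-- ===== LEMMAS AND PROOFS =====

-- Specification-side counters: nested 0/1-weighted sums counting the 4-tuples all of whose
-- prefix sums stay ≤ dollars (A's early `break` makes exactly the prefix chain matter).
def cT (x D : Int) (Ts : List Int) : Int := (Ts.map (fun t => if x + t ≤ D then (1 : Int) else 0)).sum
def cK (s D : Int) (Ks Ts : List Int) : Int := (Ks.map (fun c => if s + c ≤ D then cT (s + c) D Ts else 0)).sum
def cS (a D : Int) (Ss Ks Ts : List Int) : Int := (Ss.map (fun b => if a + b ≤ D then cK (a + b) D Ks Ts else 0)).sum
def cJ (D : Int) (Js Ss Ks Ts : List Int) : Int := (Js.map (fun a => if a ≤ D then cS a D Ss Ks Ts else 0)).sum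

lemma aCount_le_iff (J S K T : List Int) (i j k l : Nat) (D : Int) :
    (aCount ([(J, i), (S, j), (K, k), (T, l)]) 0 D ≤ D) ↔
      (J.getD i 0 ≤ D ∧ J.getD i 0 + S.getD j 0 ≤ D ∧
        J.getD i 0 + S.getD j 0 + K.getD k 0 ≤ D ∧
        J.getD i 0 + S.getD j 0 + K.getD k 0 + T.getD l 0 ≤ D) := by
  simp only [aCount]
  split_ifs <;> omega

lemma aStep_eq (J S K T : List Int) (i j k l : Nat) :
    aStep [J, S, K, T] [i, j, k, l]
      = if l + 1 < T.length then some [i, j, k, l + 1]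
        else if k + 1 < K.length then some [i, j, k + 1, 0]
        else if j + 1 < S.length then some [i, j + 1, 0, 0]
        else if i + 1 < J.length then some [i + 1, 0, 0, 0]
        else none := by
  simp only [aStep, List.map]
  split_ifs <;> rfl

lemma drop_cons (xs : List Int) (i : Nat) (h : i < xs.length) :
    xs.drop i = xs.getD i 0 :: xs.drop (i + 1) := by
  rw [List.getD_eq_getElem xs 0 h]
  exact (List.getElem_cons_drop h).symm

lemma cT_drop (x D : Int) (T : List Int) (l : Nat) (h : l < T.length) :
    cT x D (T.drop l) = (if x + T.getD l 0 ≤ D then (1 : Int) else 0) + cT x D (T.drop (l + 1)) := by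
  rw [drop_cons T l h]; simp [cT]

lemma cK_drop (s D : Int) (K T : List Int) (k : Nat) (h : k < K.length) :
    cK s D (K.drop k) T
      = (if s + K.getD k 0 ≤ D then cT (s + K.getD k 0) D T else 0) + cK s D (K.drop (k + 1)) T := by
  rw [drop_cons K k h]; simp [cK]

lemma cS_drop (a D : Int) (S K T : List Int) (j : Nat) (h : j < S.length) :
    cS a D (S.drop j) K T
      = (if a + S.getD j 0 ≤ D then cK (a + S.getD j 0) D K T else 0) + cS a D (S.drop (j + 1)) K T := by
  rw [drop_cons S j h]; simp [cS]

lemma cJ_drop (D : Int) (J S K T : List Int) (i : Nat) (h : i < J.length) :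
    cJ D (J.drop i) S K T
      = (if J.getD i 0 ≤ D then cS (J.getD i 0) D S K T else 0) + cJ D (J.drop (i + 1)) S K T := by
  rw [drop_cons J i h]; simp [cJ]

lemma cK_zero (s D : Int) (K T : List Int) (h : 0 < K.length) :
    cK s D K T = (if s + K.getD 0 0 ≤ D then cT (s + K.getD 0 0) D T else 0) + cK s D (K.drop 1) T := by
  conv_lhs => rw [show K = K.drop 0 from List.drop_zero.symm]
  rw [cK_drop _ _ _ _ 0 (by simpa using h)]

lemma cS_zero (a D : Int) (S K T : List Int) (h : 0 < S.length) :
    cS a D S K T = (if a + S.getD 0 0 ≤ D then cK (a + S.getD 0 0) D K T else 0) + cS a D (S.drop 1) K T := by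
  conv_lhs => rw [show S = S.drop 0 from List.drop_zero.symm]
  rw [cS_drop _ _ _ _ _ 0 (by simpa using h)]

lemma aLoop_succ_some (fuel : Nat) (ars : List (List Int)) (idx idx' : List Nat) (D acc : Int)
    (h : aStep ars idx = some idx') :
    aLoop (fuel + 1) ars idx D acc
      = aLoop fuel ars idx' D (if aCount (ars.zip idx) 0 D ≤ D then acc + 1 else acc) := by
  simp only [aLoop, h]

lemma aLoop_succ_none (fuel : Nat) (ars : List (List Int)) (idx : List Nat) (D acc : Int)
    (h : aStep ars idx = none) :
    aLoop (fuel + 1) ars idx D acc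
      = (if aCount (ars.zip idx) 0 D ≤ D then acc + 1 else acc) := by
  simp only [aLoop, h]

set_option maxHeartbeats 2000000 in
lemma aLoop_invariant (J S K T : List Int) (D : Int) :
    ∀ fuel (i j k l : Nat) (acc : Int),
      i < J.length → j < S.length → k < K.length → l < T.length →
      (T.length - l) + (K.length - (k + 1)) * T.length
        + (S.length - (j + 1)) * (K.length * T.length)
        + (J.length - (i + 1)) * (S.length * (K.length * T.length)) ≤ fuel →
      aLoop fuel [J, S, K, T] [i, j, k, l] D acc
        = acc
          + (if J.getD i 0 ≤ D ∧ J.getD i 0 + S.getD j 0 ≤ D ∧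
                J.getD i 0 + S.getD j 0 + K.getD k 0 ≤ D
             then cT (J.getD i 0 + S.getD j 0 + K.getD k 0) D (T.drop l) else 0)
          + (if J.getD i 0 ≤ D ∧ J.getD i 0 + S.getD j 0 ≤ D
             then cK (J.getD i 0 + S.getD j 0) D (K.drop (k + 1)) T else 0)
          + (if J.getD i 0 ≤ D then cS (J.getD i 0) D (S.drop (j + 1)) K T else 0)
          + cJ D (J.drop (i + 1)) S K T := by
  intro fuel
  induction fuel with
  | zero =>
    intro i j k l acc hi hj hk hl hfuel
    exfalso
    generalize (K.length - (k + 1)) * T.length = p1 at hfuel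
    generalize (S.length - (j + 1)) * (K.length * T.length) = p2 at hfuel
    generalize (J.length - (i + 1)) * (S.length * (K.length * T.length)) = p3 at hfuel
    omega
  | succ fuel ih =>
    intro i j k l acc hi hj hk hl hfuel
    have hcond := aCount_le_iff J S K T i j k l D
    by_cases h1 : l + 1 < T.length
    · rw [aLoop_succ_some fuel _ _ [i, j, k, l + 1] D acc (by rw [aStep_eq, if_pos h1])]
      simp only [List.zip, List.zipWith, hcond]
      rw [ih i j k (l + 1) _ hi hj hk h1 ?_]
      · rw [cT_drop _ _ _ _ hl]
        split_ifs <;> (first | (exfalso; omega) | ring | omega)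
      · generalize hp1 : (K.length - (k + 1)) * T.length = p1 at hfuel ⊢
        generalize hp2 : (S.length - (j + 1)) * (K.length * T.length) = p2 at hfuel ⊢
        generalize hp3 : (J.length - (i + 1)) * (S.length * (K.length * T.length)) = p3 at hfuel ⊢
        omega
    · have hTl : T.drop (l + 1) = [] := List.drop_eq_nil_of_le (by omega)
      have hT1 : cT (J.getD i 0 + S.getD j 0 + K.getD k 0) D (T.drop l)
          = (if J.getD i 0 + S.getD j 0 + K.getD k 0 + T.getD l 0 ≤ D then (1 : Int) else 0) := by
        rw [cT_drop _ _ _ _ hl, hTl]; simp [cT]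
      by_cases h2 : k + 1 < K.length
      · rw [aLoop_succ_some fuel _ _ [i, j, k + 1, 0] D acc (by rw [aStep_eq, if_neg h1, if_pos h2])]
        simp only [List.zip, List.zipWith, hcond]
        rw [ih i j (k + 1) 0 _ hi hj h2 (by omega) ?_]
        · rw [List.drop_zero, cK_drop _ _ _ _ _ h2, hT1]
          split_ifs <;> (first | (exfalso; omega) | ring | omega)
        · have e1 : K.length - (k + 1) = (K.length - (k + 2)) + 1 := by omega
          rw [e1, Nat.succ_mul] at hfuel
          generalize hp1 : (K.length - (k + 2)) * T.length = p1 at hfuel ⊢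
          generalize hp2 : (S.length - (j + 1)) * (K.length * T.length) = p2 at hfuel ⊢
          generalize hp3 : (J.length - (i + 1)) * (S.length * (K.length * T.length)) = p3 at hfuel ⊢
          omega
      · have hKk : K.drop (k + 1) = [] := List.drop_eq_nil_of_le (by omega)
        have hK0 : cK (J.getD i 0 + S.getD j 0) D (K.drop (k + 1)) T = 0 := by
          rw [hKk]; simp [cK]
        by_cases h3 : j + 1 < S.length
        · rw [aLoop_succ_some fuel _ _ [i, j + 1, 0, 0] D acc (by rw [aStep_eq, if_neg h1, if_neg h2, if_pos h3])]
          simp only [List.zip, List.zipWith, hcond]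
          rw [ih i (j + 1) 0 0 _ hi h3 (by omega) (by omega) ?_]
          · rw [List.drop_zero, cS_drop _ _ _ _ _ _ h3, hT1, hK0,
              cK_zero (J.getD i 0 + S.getD (j + 1) 0) D K T (by omega)]
            split_ifs <;> (first | (exfalso; omega) | ring | omega)
          · have eKT : (K.length - 1) * T.length + T.length = K.length * T.length := by
              rw [Nat.sub_one_mul]
              have := Nat.le_mul_of_pos_left T.length (show 0 < K.length by omega)
              omega
            rw [show K.length - (k + 1) = 0 from by omega, Nat.zero_mul,
              show S.length - (j + 1) = (S.length - (j + 2)) + 1 from by omega, Nat.succ_mul] at hfuel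
            generalize hq2 : K.length * T.length = q2 at eKT hfuel ⊢
            generalize hq1 : (K.length - 1) * T.length = q1 at eKT ⊢
            generalize hq3 : (S.length - (j + 2)) * q2 = q3 at hfuel ⊢
            generalize hq5 : (J.length - (i + 1)) * (S.length * q2) = q5 at hfuel ⊢
            omega
        · have hSj : S.drop (j + 1) = [] := List.drop_eq_nil_of_le (by omega)
          have hS0 : cS (J.getD i 0) D (S.drop (j + 1)) K T = 0 := by rw [hSj]; simp [cS]
          by_cases h4 : i + 1 < J.length
          · rw [aLoop_succ_some fuel _ _ [i + 1, 0, 0, 0] D acc (by rw [aStep_eq, if_neg h1, if_neg h2, if_neg h3, if_pos h4])]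
            simp only [List.zip, List.zipWith, hcond]
            rw [ih (i + 1) 0 0 0 _ h4 (by omega) (by omega) (by omega) ?_]
            · rw [List.drop_zero, cJ_drop _ _ _ _ _ _ h4, hT1, hK0, hS0,
                cS_zero (J.getD (i + 1) 0) D S K T (by omega),
                cK_zero (J.getD (i + 1) 0 + S.getD 0 0) D K T (by omega)]
              split_ifs <;> (first | (exfalso; omega) | ring | omega)
            · have eKT : (K.length - 1) * T.length + T.length = K.length * T.length := by
                rw [Nat.sub_one_mul]
                have := Nat.le_mul_of_pos_left T.length (show 0 < K.length by omega)
                omega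
              have eSKT : (S.length - 1) * (K.length * T.length) + K.length * T.length
                  = S.length * (K.length * T.length) := by
                rw [Nat.sub_one_mul]
                have := Nat.le_mul_of_pos_left (K.length * T.length) (show 0 < S.length by omega)
                omega
              rw [show K.length - (k + 1) = 0 from by omega, Nat.zero_mul,
                show S.length - (j + 1) = 0 from by omega, Nat.zero_mul,
                show J.length - (i + 1) = (J.length - (i + 2)) + 1 from by omega, Nat.succ_mul] at hfuel
              generalize hq2 : K.length * T.length = q2 at eKT eSKT hfuel ⊢
              generalize hq4 : S.length * q2 = q4 at eSKT hfuel ⊢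
              generalize hq1 : (K.length - 1) * T.length = q1 at eKT ⊢
              generalize hq3 : (S.length - 1) * q2 = q3 at eSKT ⊢
              generalize hq5 : (J.length - (i + 2)) * q4 = q5 at hfuel ⊢
              omega
          · rw [aLoop_succ_none fuel _ _ D acc (by rw [aStep_eq, if_neg h1, if_neg h2, if_neg h3, if_neg h4])]
            simp only [List.zip, List.zipWith, hcond]
            have hJi : J.drop (i + 1) = [] := List.drop_eq_nil_of_le (by omega)
            have hJ0 : cJ D (J.drop (i + 1)) S K T = 0 := by rw [hJi]; simp [cJ]
            rw [hT1, hK0, hS0, hJ0]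
            split_ifs <;> (first | (exfalso; omega) | ring | omega)

-- swap of two list sums
lemma sum_swap (l1 l2 : List Int) (f : Int → Int → Int) :
  (l1.map (fun a => (l2.map (f a)).sum)).sum = (l2.map (fun b => (l1.map (fun a => f a b)).sum)).sum := by
  induction l1 with
  | nil => simp
  | cons a l1 ih => simp only [List.map_cons, List.sum_cons, ih, PySem.List.sum_map_add_int]

-- bisectRight on a sorted list counts the elements ≤ x
lemma bisect_eq_countP (xs : List Int) (x : Int) (hs : xs.Pairwise (· ≤ ·)) :
    (PySem.List.bisectRight xs x : Int) = (xs.countP (fun s => s ≤ x) : Nat) := by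
  obtain ⟨hle, hpre, hpost⟩ := PySem.List.bisectRight_spec xs x hs
  set r := PySem.List.bisectRight xs x with hr
  have h1 : (xs.take r).countP (fun s => s ≤ x) = (xs.take r).length := by
    rw [List.countP_eq_length]
    intro y hy
    rw [List.mem_take_iff_getElem] at hy
    obtain ⟨j, hj, e⟩ := hy
    simpa [← e] using hpre j (by omega) (by omega)
  have h2 : (xs.drop r).countP (fun s => s ≤ x) = 0 := by
    rw [List.countP_eq_zero]
    intro y hy
    rw [List.mem_drop_iff_getElem] at hy
    obtain ⟨j, hj, e⟩ := hy
    have := hpost (r + j) (by omega) (by omega)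
    simp only [← e] at *
    simpa using by omega
  have := List.take_append_drop r xs
  have hc : xs.countP (fun s => s ≤ x) = ((xs.take r) ++ (xs.drop r)).countP (fun s => s ≤ x) := by rw [this]
  rw [hc, List.countP_append, h1, h2, List.length_take]
  congr 1
  omega

lemma countP_filterMap_c (K : List Int) (s D : Int) (p : Int → Bool) :
    (((K.filterMap (fun c => if s + c ≤ D then some (s + c) else none)).countP p : Nat) : Int)
      = (K.map (fun c => if (s + c ≤ D ∧ p (s + c)) then (1 : Int) else 0)).sum := by
  induction K with
  | nil => simp
  | cons c K ih =>
    by_cases hc : s + c ≤ D <;> by_cases hp : p (s + c) = true <;>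
      simp [List.filterMap_cons, List.countP_cons, hc, hp, ← ih] <;> push_cast <;> ring

lemma countP_flatMap_b (S K : List Int) (a D : Int) (p : Int → Bool) :
    (((S.flatMap (fun b => if a + b > D then [] else
        K.filterMap (fun c => if a + b + c ≤ D then some (a + b + c) else none))).countP p : Nat) : Int)
      = (S.map (fun b => if a + b ≤ D then
          (K.map (fun c => if (a + b + c ≤ D ∧ p (a + b + c)) then (1 : Int) else 0)).sum else 0)).sum := by
  induction S with
  | nil => simp
  | cons b S ih =>
    simp only [List.flatMap_cons, List.countP_append, List.map_cons, List.sum_cons] at *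
    push_cast
    rw [ih]
    congr 1
    by_cases hb : a + b > D
    · rw [if_pos hb, if_neg (by omega)]; simp
    · rw [if_neg hb, if_pos (by omega)]
      exact countP_filterMap_c K (a + b) D p

lemma countP_bSums (J S K : List Int) (D : Int) (p : Int → Bool) :
    (((bSums J S K D).countP p : Nat) : Int)
      = (J.map (fun a => if a ≤ D then
          (S.map (fun b => if a + b ≤ D then
            (K.map (fun c => if (a + b + c ≤ D ∧ p (a + b + c)) then (1 : Int) else 0)).sum else 0)).sum
          else 0)).sum := by
  induction J with
  | nil => simp [bSums]
  | cons a J ih =>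
    simp only [bSums, List.flatMap_cons, List.countP_append, List.map_cons, List.sum_cons] at *
    push_cast
    rw [ih]
    congr 1
    by_cases ha : a > D
    · rw [if_pos ha, if_neg (by omega)]; simp
    · rw [if_neg ha, if_pos (by omega)]
      exact countP_flatMap_b S K a D p

lemma sum_congr' (l : List Int) (f g : Int → Int) (h : ∀ x ∈ l, f x = g x) :
    (l.map f).sum = (l.map g).sum := by
  rw [List.map_congr_left h]

-- pull the innermost (tops) sum to the outside of the triple nested sum
lemma sum_t_front (A B C T : List Int) (F : Int → Int → Int → Int → Int) :
    (A.map (fun a => (B.map (fun b => (C.map (fun c => (T.map (F a b c)).sum)).sum)).sum)).sum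
      = (T.map (fun t => (A.map (fun a => (B.map (fun b => (C.map (fun c => F a b c t)).sum)).sum)).sum)).sum := by
  calc (A.map (fun a => (B.map (fun b => (C.map (fun c => (T.map (F a b c)).sum)).sum)).sum)).sum
      = (A.map (fun a => (B.map (fun b => (T.map (fun t => (C.map (fun c => F a b c t)).sum)).sum)).sum)).sum := by
        exact sum_congr' _ _ _ (fun a _ => sum_congr' _ _ _ (fun b _ => sum_swap C T (fun c t => F a b c t)))
    _ = (A.map (fun a => (T.map (fun t => (B.map (fun b => (C.map (fun c => F a b c t)).sum)).sum)).sum)).sum := by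
        exact sum_congr' _ _ _ (fun a _ => sum_swap B T (fun b t => (C.map (fun c => F a b c t)).sum))
    _ = (T.map (fun t => (A.map (fun a => (B.map (fun b => (C.map (fun c => F a b c t)).sum)).sum)).sum)).sum := by
        exact sum_swap A T (fun a t => (B.map (fun b => (C.map (fun c => F a b c t)).sum)).sum)

lemma ite_sum (P : Prop) [Decidable P] (l : List Int) (g : Int → Int) :
    (if P then (l.map g).sum else 0) = (l.map (fun x => if P then g x else 0)).sum := by
  split_ifs
  · rfl
  · simp

lemma b_eq_cJ (J S K T : List Int) (D w : Int) :
    numberOfOptionsUtil_alt J S K T D w = w + cJ D J S K T := by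
  unfold numberOfOptionsUtil_alt
  set s1 := PySem.List.sorted (bSums J S K D) (fun x => x) with hs1
  -- the per-t bisect count, as a nested sum over (a, b, c)
  have hcount : ∀ t : Int,
      ((PySem.List.bisectRight s1 (D - t) : Nat) : Int)
        = (J.map (fun a => if a ≤ D then
            (S.map (fun b => if a + b ≤ D then
              (K.map (fun c => if (a + b + c ≤ D ∧ a + b + c ≤ D - t) then (1 : Int) else 0)).sum else 0)).sum
            else 0)).sum := by
    intro t
    rw [bisect_eq_countP _ _ (PySem.List.sorted_pairwise (bSums J S K D) (fun x => x)),
      (PySem.List.sorted_perm (bSums J S K D) (fun x => x) false).countP_eq,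
      countP_bSums]
    simp
  -- flatten the foldl loop into a sum over tops
  rw [PySem.List.foldl_add]
  congr 1
  -- reorder cJ's nested sums to bring t outermost and compare pointwise
  have hcJ : cJ D J S K T
      = (J.map (fun a => (S.map (fun b => (K.map (fun c => (T.map (fun t =>
          if a ≤ D ∧ a + b ≤ D ∧ a + b + c ≤ D ∧ a + b + c + t ≤ D then (1 : Int) else 0)).sum)).sum)).sum)).sum := by
    unfold cJ cS cK cT
    refine sum_congr' _ _ _ (fun a _ => ?_)
    rw [ite_sum]
    refine sum_congr' _ _ _ (fun b _ => ?_)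
    rw [← ite_and, ite_sum]
    refine sum_congr' _ _ _ (fun c _ => ?_)
    rw [← ite_and, ite_sum]
    refine sum_congr' _ _ _ (fun t _ => ?_)
    rw [← ite_and]
    simp only [and_assoc]
  rw [hcJ, sum_t_front]
  refine (sum_congr' _ _ _ (fun t _ => ?_)).symm
  rw [hcount]
  refine sum_congr' _ _ _ (fun a _ => ?_)
  rw [ite_sum]
  refine sum_congr' _ _ _ (fun b _ => ?_)
  rw [← ite_and, ite_sum]
  refine sum_congr' _ _ _ (fun c _ => ?_)
  rw [← ite_and]
  split_ifs <;> first | rfl | (exfalso; omega)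

lemma cJ_zero (D : Int) (J S K T : List Int) (h : 0 < J.length) :
    cJ D J S K T = (if J.getD 0 0 ≤ D then cS (J.getD 0 0) D S K T else 0) + cJ D (J.drop 1) S K T := by
  conv_lhs => rw [show J = J.drop 0 from List.drop_zero.symm]
  rw [cJ_drop _ _ _ _ _ 0 (by simpa using h)]

lemma a_eq_cJ (J S K T : List Int) (D w : Int)
    (hJ : J ≠ []) (hS : S ≠ []) (hK : K ≠ []) (hT : T ≠ []) :
    numberOfOptionsUtil J S K T D w = w + cJ D J S K T := by
  have hJ' : 0 < J.length := List.length_pos_of_ne_nil hJ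
  have hS' : 0 < S.length := List.length_pos_of_ne_nil hS
  have hK' : 0 < K.length := List.length_pos_of_ne_nil hK
  have hT' : 0 < T.length := List.length_pos_of_ne_nil hT
  unfold numberOfOptionsUtil
  rw [aLoop_invariant J S K T D _ 0 0 0 0 w hJ' hS' hK' hT' ?_]
  · rw [List.drop_zero, cJ_zero D J S K T hJ', cS_zero (J.getD 0 0) D S K T hS',
      cK_zero (J.getD 0 0 + S.getD 0 0) D K T hK']
    split_ifs <;> (first | (exfalso; omega) | ring | omega)
  · have eKT : (K.length - 1) * T.length + T.length = K.length * T.length := by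
      rw [Nat.sub_one_mul]
      have := Nat.le_mul_of_pos_left T.length hK'
      omega
    have eSKT : (S.length - 1) * (K.length * T.length) + K.length * T.length
        = S.length * (K.length * T.length) := by
      rw [Nat.sub_one_mul]
      have := Nat.le_mul_of_pos_left (K.length * T.length) hS'
      omega
    have eJSKT : (J.length - 1) * (S.length * (K.length * T.length))
          + S.length * (K.length * T.length)
        = J.length * (S.length * (K.length * T.length)) := by
      rw [Nat.sub_one_mul]
      have := Nat.le_mul_of_pos_left (S.length * (K.length * T.length)) hJ'
      omega
    have eassoc : J.length * S.length * K.length * T.length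
        = J.length * (S.length * (K.length * T.length)) := by ring
    rw [eassoc]
    simp only [Nat.sub_zero, Nat.zero_add]
    generalize hq2 : K.length * T.length = q2 at eKT eSKT eJSKT ⊢
    generalize hq4 : S.length * q2 = q4 at eSKT eJSKT ⊢
    generalize hq6 : J.length * q4 = q6 at eJSKT ⊢
    generalize hq1 : (K.length - 1) * T.length = q1 at eKT ⊢
    generalize hq3 : (S.length - 1) * q2 = q3 at eSKT ⊢
    generalize hq5 : (J.length - 1) * q4 = q5 at eJSKT ⊢
    omega

lemma a_corner (J S K T : List Int) (D w : Int) (h : S = [] ∨ K = [] ∨ T = []) :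
    numberOfOptionsUtil J S K T D w = w := by
  have h0 : J.length * S.length * K.length * T.length = 0 := by
    rcases h with rfl | rfl | rfl <;> simp
  unfold numberOfOptionsUtil
  rw [h0, aLoop]

lemma bSums_corner (J S K : List Int) (D : Int) (h : S = [] ∨ K = []) :
    bSums J S K D = [] := by
  rcases h with rfl | rfl <;> simp [bSums]

lemma b_corner (J S K T : List Int) (D w : Int) (h : S = [] ∨ K = [] ∨ T = []) :
    numberOfOptionsUtil_alt J S K T D w = w := by
  rcases h with h | h | h
  · rw [b_eq_cJ]
    have : bSums J S K D = [] := bSums_corner J S K D (Or.inl h)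
    subst h; simp [cJ, cS]
  · rw [b_eq_cJ]; subst h; simp [cJ, cS, cK]
  · simp only [numberOfOptionsUtil_alt]
    subst h; rfl

-- ===== VERDICT (by name: the statement is the Claim_ definition above) =====
theorem numberOfOptionsUtil_spec : Claim_equal_numberOfOptionsUtil := by
  intro J S K T D w _hDom hPre
  obtain ⟨hJ, hrest⟩ := hPre
  show _ = _
  rcases hrest with ⟨hS, hK, hT⟩ | ⟨hS, -⟩ | ⟨-, hK, -⟩ | ⟨-, -, hT, -⟩
  · rw [a_eq_cJ J S K T D w hJ hS hK hT, b_eq_cJ]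
  · rw [a_corner J S K T D w (Or.inl hS), b_corner J S K T D w (Or.inl hS)]
  · rw [a_corner J S K T D w (Or.inr (Or.inl hK)), b_corner J S K T D w (Or.inr (Or.inl hK))]
  · rw [a_corner J S K T D w (Or.inr (Or.inr hT)), b_corner J S K T D w (Or.inr (Or.inr hT))]
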